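-- pv_equiv track=rewrite | github.com/cannonboldoff-hue/SEARCH_ENGINE | apps/api/src/services/search.py | _sanitize_why_matched_lines
-- ===== SOURCE A (Python) =====
-- from typing import Any
--
-- def _compact_text(value: Any, max_len: int = 180) -> str | None:
--     """Normalize whitespace and trim text for prompt payloads."""
--     if value is None:
--         return None
--     txt = " ".join(str(value).split()).strip()
--     if not txt:
--         return None
--     return txt[:max_len]
--
-- def _sanitize_why_matched_lines(raw_lines: Any, max_items: int = 3) -> list[str]:
--     """Normalize and bound LLM reason lines."""
--     if not isinstance(raw_lines, (list, tuple)):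
--         return []
--     out: list[str] = []
--     seen: set[str] = set()
--     for line in raw_lines:
--         txt = _compact_text(line, 120)
--         if not txt:
--             continue
--         key = txt.lower()
--         if key in seen:
--             continue
--         seen.add(key)
--         out.append(txt)
--         if len(out) >= max_items:
--             break
--     return out
-- ===== SOURCE B (Python) =====
-- from typing import Any
--
-- def _compact_text(value: Any, max_len: int = 180) -> str | None:
--     """Normalize whitespace and trim text for prompt payloads."""
--     if value is None:
--         return None
--     txt = " ".join(str(value).split()).strip()
--     if not txt:
--         return None
--     return txt[:max_len]
--
-- def _sanitize_why_matched_lines(raw_lines: Any, max_items: int = 3) -> list[str]: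
--     """Normalize and bound LLM reason lines: staged map/filter, dict dedup, slice."""
--     if not isinstance(raw_lines, (list, tuple)):
--         return []
--     texts = [txt for txt in (_compact_text(line, 120) for line in raw_lines) if txt]
--     dedup: dict[str, str] = {}
--     for txt in texts:
--         dedup.setdefault(txt.lower(), txt)
--     return list(dedup.values())[:max(max_items, 0)]
-- ===== Notes on version B (the rewrite author's own statement) =====
-- stated objective: alternative
-- what changed: Replaces A's single interleaved loop (normalize, dedup via a seen-set, and early break all in one pass) by staged passes: map/filter the lines through _compact_text, one dict.setdefault pass for order-preserving case-insensitive dedup, then a single slice to bound the result.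
-- intended difference: On inputs with max_items <= 0 and at least one non-blank line, A returns a one-element list (it checks the bound only after appending), while B returns an empty list, the intended 'at most max_items items' behaviour. — e.g. on _sanitize_why_matched_lines(["hi"], 0): A returns ["hi"], B returns []
import Mathlib
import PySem

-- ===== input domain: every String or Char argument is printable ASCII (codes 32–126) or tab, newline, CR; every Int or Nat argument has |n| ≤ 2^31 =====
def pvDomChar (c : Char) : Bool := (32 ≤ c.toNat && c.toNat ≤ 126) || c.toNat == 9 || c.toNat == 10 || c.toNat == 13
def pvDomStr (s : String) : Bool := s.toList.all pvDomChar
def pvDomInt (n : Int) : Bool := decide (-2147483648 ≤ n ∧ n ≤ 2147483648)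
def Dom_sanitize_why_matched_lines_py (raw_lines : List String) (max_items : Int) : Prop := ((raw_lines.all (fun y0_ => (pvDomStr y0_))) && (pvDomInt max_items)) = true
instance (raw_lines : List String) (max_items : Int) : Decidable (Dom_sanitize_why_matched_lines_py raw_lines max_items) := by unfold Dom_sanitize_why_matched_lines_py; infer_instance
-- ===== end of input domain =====

-- B replaces A's interleaved dedup-and-break loop by staged passes (map/filter, dict-setdefault dedup, slice);
-- on max_items ≤ 0 B returns an empty list (the intended bound) where A returns one line — stated as D_ below.

-- ===== PORT A =====
-- shared module helper _compact_text (used verbatim by both A and B)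
def pvCompact (value : String) (max_len : Int) : Option String :=
  -- value is a String here, never None, so the 'if value is None' branch cannot fire
  let txt := PySem.Str.strip (PySem.Str.join " " (PySem.Str.split₀ value))
  if txt = "" then none
  else some (PySem.Str.slice txt none (some max_len))

-- A's for-loop with early break, as structural recursion over the lines
def pvLoopA (lines : List String) (out : List String) (seen : PySem.Set String) (max_items : Int) : List String :=
  match lines with
  | [] => out
  | line :: rest =>
    match pvCompact line 120 with
    | none => pvLoopA rest out seen max_items            -- if not txt: continue
    | some txt =>
      let key := PySem.Str.lower txt
      if PySem.Set.contains seen key then pvLoopA rest out seen max_items   -- if key in seen: continue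
      else
        let seen' := PySem.Set.add seen key
        let out' := out ++ [txt]
        if max_items ≤ (out'.length : Int) then out'     -- if len(out) >= max_items: break
        else pvLoopA rest out' seen' max_items

def sanitize_why_matched_lines_py (raw_lines : List String) (max_items : Int) : List String :=
  -- isinstance(raw_lines, (list, tuple)) is always true under this typing
  pvLoopA raw_lines [] PySem.Set.empty max_items

-- ===== PORT B =====
def sanitize_why_matched_lines_py_alt (raw_lines : List String) (max_items : Int) : List String :=
  -- texts = [txt for txt in (_compact_text(line, 120) for line in raw_lines) if txt]
  let texts := raw_lines.filterMap (fun line => pvCompact line 120)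
  -- for txt in texts: dedup.setdefault(txt.lower(), txt)
  let dedup := texts.foldl (fun d txt => PySem.Dict.setdefault d (PySem.Str.lower txt) txt) PySem.Dict.empty
  -- list(dedup.values())[:max(max_items, 0)]
  PySem.List.slice (PySem.Dict.values dedup) none (some (max max_items 0))

-- ===== PRECONDITION & SPEC =====
-- On inputs with max_items ≤ 0 and at least one non-blank line, A returns a one-element list (it tests the
-- bound only after appending), while B returns the empty list, the intended "at most max_items items" behaviour.
def D_sanitize_why_matched_lines_py (raw_lines : List String) (max_items : Int) : Prop :=
  max_items ≤ 0 ∧ raw_lines.any (fun s => s.toList.any (fun c => !PySem.Chars.isspace c)) = true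
instance (raw_lines : List String) (max_items : Int) : Decidable (D_sanitize_why_matched_lines_py raw_lines max_items) := by unfold D_sanitize_why_matched_lines_py; infer_instance

def Spec_sanitize_why_matched_lines_py (raw_lines : List String) (max_items : Int) (out : List String) : Prop := ¬ D_sanitize_why_matched_lines_py raw_lines max_items → out = sanitize_why_matched_lines_py_alt raw_lines max_items
instance (raw_lines : List String) (max_items : Int) (out : List String) : Decidable (Spec_sanitize_why_matched_lines_py raw_lines max_items out) := by unfold Spec_sanitize_why_matched_lines_py; infer_instance

def pvDiffWitness_sanitize_why_matched_lines_py : List String × Int := (["hi"], 0)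
def pvDiffWitnessOut_sanitize_why_matched_lines_py : (List String) × (List String) := (["hi"], [])

-- ===== CLAIM (what is proved, stated in full; the proofs are below) =====
def Claim_unchanged_sanitize_why_matched_lines_py : Prop := ∀ (raw_lines : List String) (max_items : Int), Dom_sanitize_why_matched_lines_py raw_lines max_items → Spec_sanitize_why_matched_lines_py raw_lines max_items (sanitize_why_matched_lines_py raw_lines max_items)
def Claim_changed_sanitize_why_matched_lines_py : Prop := Dom_sanitize_why_matched_lines_py (pvDiffWitness_sanitize_why_matched_lines_py.1) (pvDiffWitness_sanitize_why_matched_lines_py.2) ∧ D_sanitize_why_matched_lines_py (pvDiffWitness_sanitize_why_matched_lines_py.1) (pvDiffWitness_sanitize_why_matched_lines_py.2) ∧ sanitize_why_matched_lines_py (pvDiffWitness_sanitize_why_matched_lines_py.1) (pvDiffWitness_sanitize_why_matched_lines_py.2) = pvDiffWitnessOut_sanitize_why_matched_lines_py.1 ∧ sanitize_why_matched_lines_py_alt (pvDiffWitness_sanitize_why_matched_lines_py.1) (pvDiffWitness_sanitize_why_matched_lines_py.2) = pvDiffWitnessOut_sanitize_why_matched_lines_py.2 ∧ pvDiffWitnessOut_sanitize_why_matched_lines_py.1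 ≠ pvDiffWitnessOut_sanitize_why_matched_lines_py.2

-- ===== LEMMAS AND PROOFS =====

-- order-preserving first-occurrence dedup (by lowercase key), with the keys already seen
def pvDed (texts : List String) (ks : List String) : List String :=
  match texts with
  | [] => []
  | t :: rest =>
    if PySem.Str.lower t ∈ ks then pvDed rest ks
    else t :: pvDed rest (ks ++ [PySem.Str.lower t])

theorem pvLoopA_eq (lines : List String) : ∀ (out seen : List String) (m : Int),
    (out.length : Int) < m →
    pvLoopA lines out seen m
      = out ++ (pvDed (lines.filterMap (fun l => pvCompact l 120)) seen).take (m.toNat - out.length) := by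
  induction lines with
  | nil => intro out seen m h; simp [pvLoopA, pvDed]
  | cons line rest ih =>
    intro out seen m h
    cases hc : pvCompact line 120 with
    | none => simp [pvLoopA, hc, ih out seen m h]
    | some txt =>
      by_cases hmem : PySem.Str.lower txt ∈ seen
      · have hcont : PySem.Set.contains seen (PySem.Str.lower txt) = true := by
          simp [PySem.Set.contains, hmem]
        simp [pvLoopA, hc, pvDed, hmem, ih out seen m h]
      · have hcont : PySem.Set.contains seen (PySem.Str.lower txt) = false := by
          simp [PySem.Set.contains, hmem]
        by_cases hb : m ≤ ((out ++ [txt]).length : Int)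
        · have hb' : m ≤ (out.length : Int) + 1 := by simpa using hb
          have hm : m.toNat - out.length = 1 := by omega
          simp [pvLoopA, hc, pvDed, hmem, hm]
          intro hx; exfalso; omega
        · have h' : ((out ++ [txt]).length : Int) < m := by simp at hb ⊢; omega
          have h'' : ((out.length : Int)) + 1 < m := by simpa using h'
          have hm : m.toNat - out.length = (m.toNat - (out.length + 1)) + 1 := by omega
          simp [pvLoopA, hc, pvDed, hmem,
                ih (out ++ [txt]) (seen ++ [PySem.Str.lower txt]) m h', hm, List.take_succ_cons]
          intro hx; exfalso; omega

theorem pvValsB (texts : List String) : ∀ (d : PySem.Dict String String),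
    (texts.foldl (fun d txt => PySem.Dict.setdefault d (PySem.Str.lower txt) txt) d).values
      = d.values ++ pvDed texts d.keys := by
  induction texts with
  | nil => intro d; simp [pvDed]
  | cons t rest ih =>
    intro d
    by_cases hmem : PySem.Str.lower t ∈ d.keys
    · have hcont : PySem.Dict.contains d (PySem.Str.lower t) = true :=
        (PySem.Dict.contains_iff_mem_keys d _).mpr hmem
      have hsd : PySem.Dict.setdefault d (PySem.Str.lower t) t = d := by
        simp [PySem.Dict.setdefault, hcont]
      rw [List.foldl_cons, hsd, ih d]
      simp [pvDed, hmem]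
    · have hcont : PySem.Dict.contains d (PySem.Str.lower t) = false := by
        rw [Bool.eq_false_iff]
        exact fun hcon => hmem ((PySem.Dict.contains_iff_mem_keys d _).mp hcon)
      have hmem' : PySem.Str.lower t ∉ List.map (fun x => x.1) d.items := by
        simpa [PySem.Dict.keys] using hmem
      have hsd : PySem.Dict.setdefault d (PySem.Str.lower t) t
          = PySem.Dict.mk (d.items ++ [(PySem.Str.lower t, t)]) := by
        simp [PySem.Dict.setdefault, hcont]
      rw [List.foldl_cons, hsd, ih (PySem.Dict.mk (d.items ++ [(PySem.Str.lower t, t)]))]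
      simp [PySem.Dict.values, PySem.Dict.keys, pvDed, hmem']

theorem pvGoBlank (cs : List Char) : ∀ acc, (∀ c ∈ cs, PySem.Chars.isspace c = true) →
    PySem.Chars.split₀.go cs [] acc = acc.reverse := by
  induction cs with
  | nil => intro acc _; simp [PySem.Chars.split₀.go]
  | cons c rest ih =>
    intro acc h
    have hc := h c (by simp)
    simp [PySem.Chars.split₀.go, hc]
    exact ih acc (fun x hx => h x (by simp [hx]))

theorem pvCompactBlank (s : String) (h : ∀ c ∈ s.toList, PySem.Chars.isspace c = true) :
    pvCompact s 120 = none := by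
  have h0 : PySem.Chars.split₀ s.toList = [] := by
    simpa [PySem.Chars.split₀] using pvGoBlank s.toList [] h
  simp [pvCompact, PySem.Str.split₀, h0, PySem.Str.join, PySem.Chars.join, List.intercalate,
        PySem.Str.strip, PySem.Chars.strip, PySem.Chars.lstrip, PySem.Chars.rstrip]

theorem pvLoopA_allNone (lines : List String) : ∀ (out seen : List String) (m : Int),
    (∀ l ∈ lines, pvCompact l 120 = none) → pvLoopA lines out seen m = out := by
  induction lines with
  | nil => intro out seen m _; simp [pvLoopA]
  | cons line rest ih =>
    intro out seen m h
    have hc := h line (by simp)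
    simp [pvLoopA, hc]
    exact ih out seen m (fun l hl => h l (by simp [hl]))

-- ===== VERDICT (by name: the statement is the Claim_ definition above) =====
theorem sanitize_why_matched_lines_py_spec : Claim_unchanged_sanitize_why_matched_lines_py := by
  intro raw m _
  unfold Spec_sanitize_why_matched_lines_py
  intro hd
  simp only [sanitize_why_matched_lines_py, sanitize_why_matched_lines_py_alt]
  by_cases hm : 1 ≤ m
  · have h0 : ((List.length ([] : List String)) : Int) < m := by simp; omega
    have hmax : max m 0 = m := by omega
    rw [pvLoopA_eq raw [] PySem.Set.empty m h0, hmax,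
        PySem.List.slice_to _ (by omega : (0:Int) ≤ m),
        pvValsB (raw.filterMap (fun l => pvCompact l 120)) PySem.Dict.empty]
    simp [PySem.Dict.empty, PySem.Dict.values, PySem.Dict.keys, PySem.Set.empty]
  · -- max_items ≤ 0: outside D_ every line is blank, so both sides are []
    have hm0 : m ≤ 0 := by omega
    have hblank : raw.any (fun s => s.toList.any (fun c => !PySem.Chars.isspace c)) = false := by
      by_contra hb
      exact hd ⟨hm0, by simpa using hb⟩
    have hall : ∀ l ∈ raw, pvCompact l 120 = none := by
      intro l hl
      apply pvCompactBlank
      intro c hc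
      simp [List.any_eq_false] at hblank
      have := hblank l hl
      simpa using this c hc
    have htexts : raw.filterMap (fun l => pvCompact l 120) = [] := by
      rw [List.filterMap_eq_nil_iff]; exact hall
    have hmax : max m 0 = ((0 : Nat) : Int) := by simp; omega
    rw [pvLoopA_allNone raw [] PySem.Set.empty m hall, htexts, hmax,
        PySem.List.slice_to _ (by simp : (0:Int) ≤ ((0 : Nat) : Int))]
    simp [PySem.Dict.empty, PySem.Dict.values]

theorem sanitize_why_matched_lines_py_changed : Claim_changed_sanitize_why_matched_lines_py := by
  unfold Claim_changed_sanitize_why_matched_lines_py; decide
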